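-- pv_equiv track=rewrite | github.com/zqshi/ThinkCraft | backend/services/deep-research/deep_research_client.py | _filter_results_by_keywords
-- ===== SOURCE A (Python) =====
-- from typing import List, Dict, Any, Optional
--
-- def _filter_results_by_keywords(results: List[Dict[str, Any]], keywords: List[str]) -> List[Dict[str, Any]]:
--     """根据关键词相关度筛选来源，剔除明显无关项"""
--     if not results:
--         return []
--     if not keywords:
--         return results[:10]
--
--     scored = []
--     for r in results:
--         text = f"{r.get('title','')} {r.get('content','')}".lower()
--         hits = sum(1 for k in keywords if k in text)
--         scored.append((hits, r))
--
--     # 保留相关度>0，最多10条；若全部为0，保留原始前10条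
--     filtered = [r for hits, r in sorted(scored, key=lambda x: x[0], reverse=True) if hits > 0]
--     return (filtered or [r for _, r in scored])[:10]
-- ===== SOURCE B (Python) =====
-- def _filter_results_by_keywords(results, keywords):
--     if not results:
--         return []
--     if not keywords:
--         return results[:10]
--     buckets = [[] for _ in range(len(keywords) + 1)]
--     for r in results:
--         text = f"{r.get('title','')} {r.get('content','')}".lower()
--         hits = sum(1 for k in keywords if k in text)
--         buckets[hits].append(r)
--     filtered = []
--     for h in range(len(keywords), 0, -1):
--         filtered.extend(buckets[h])
--     return (filtered or results)[:10]
-- ===== Notes on version B (the rewrite author's own statement) =====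
-- stated objective: alternative
-- what changed: Replaces sort-by-score-then-filter with bucket distribution: each result is appended to a bucket indexed by its hit count, and buckets are concatenated from the highest count down to 1, reproducing the stable descending order without sorting.
import Mathlib
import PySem

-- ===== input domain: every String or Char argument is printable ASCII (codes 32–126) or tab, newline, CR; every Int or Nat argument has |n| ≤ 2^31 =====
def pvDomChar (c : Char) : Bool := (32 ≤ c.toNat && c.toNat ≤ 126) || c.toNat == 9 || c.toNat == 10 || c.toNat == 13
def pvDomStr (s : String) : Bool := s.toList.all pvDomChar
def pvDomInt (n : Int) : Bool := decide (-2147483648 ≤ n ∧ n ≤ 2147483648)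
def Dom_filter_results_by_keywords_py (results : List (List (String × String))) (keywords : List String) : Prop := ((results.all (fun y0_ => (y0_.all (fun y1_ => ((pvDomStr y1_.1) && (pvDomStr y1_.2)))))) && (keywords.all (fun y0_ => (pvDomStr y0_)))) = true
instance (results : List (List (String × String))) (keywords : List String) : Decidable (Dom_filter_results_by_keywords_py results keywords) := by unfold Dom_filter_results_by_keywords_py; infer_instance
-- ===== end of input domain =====

-- B replaces A's sort-by-score-then-filter with a bucket collection per hit count,
-- iterated from the highest count down (objective: alternative algorithm, no sort).

-- ===== PORT A =====
-- text = f"{r.get('title','')} {r.get('content','')}".lower()   (dict lookup = first match)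
def pvText (r : List (String × String)) : String :=
  PySem.Str.lower ((r.lookup "title").getD "" ++ " " ++ (r.lookup "content").getD "")

-- hits = sum(1 for k in keywords if k in text)
def pvHits (keywords : List String) (text : String) : Int :=
  keywords.foldl (fun acc k => if PySem.Str.isIn k text then acc + 1 else acc) 0

def filter_results_by_keywords_py (results : List (List (String × String))) (keywords : List String) : List (List (String × String)) :=
  if results = [] then []
  else if keywords = [] then PySem.List.slice results none (some 10)
  else
    let scored := results.map (fun r => (pvHits keywords (pvText r), r))
    let filtered := ((PySem.List.sorted scored (fun x => x.1) true).filter (fun x => 0 < x.1)).map (fun x => x.2)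
    PySem.List.slice (if filtered = [] then scored.map (fun x => x.2) else filtered) none (some 10)

-- ===== PORT B =====
def filter_results_by_keywords_py_alt (results : List (List (String × String))) (keywords : List String) : List (List (String × String)) :=
  if results = [] then []
  else if keywords = [] then PySem.List.slice results none (some 10)
  else
    -- buckets = [[] for _ in range(len(keywords)+1)]; buckets[hits].append(r)
    let buckets := results.foldl
      (fun bk r => PySem.List.pySetD bk (pvHits keywords (pvText r))
        (PySem.List.pyGetD bk (pvHits keywords (pvText r)) [] ++ [r]))
      ((PySem.List.pyRange 0 ((keywords.length : Int) + 1) 1).map (fun _ => []))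
    -- for h in range(len(keywords), 0, -1): filtered.extend(buckets[h])
    let filtered := (PySem.List.pyRange (keywords.length : Int) 0 (-1)).foldl
        (fun acc h => acc ++ PySem.List.pyGetD buckets h []) []
    PySem.List.slice (if filtered = [] then results else filtered) none (some 10)

-- ===== PRECONDITION & SPEC =====
def Spec_filter_results_by_keywords_py (results : List (List (String × String))) (keywords : List String) (out : List (List (String × String))) : Prop := out = filter_results_by_keywords_py_alt results keywords
instance (results : List (List (String × String))) (keywords : List String) (out : List (List (String × String))) : Decidable (Spec_filter_results_by_keywords_py results keywords out) := by unfold Spec_filter_results_by_keywords_py; infer_instance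

-- ===== CLAIM (what is proved, stated in full; the proofs are below) =====
def Claim_equal_filter_results_by_keywords_py : Prop := ∀ (results : List (List (String × String))) (keywords : List String), Dom_filter_results_by_keywords_py results keywords → Spec_filter_results_by_keywords_py results keywords (filter_results_by_keywords_py results keywords)

-- ===== LEMMAS AND PROOFS =====

-- insertBy walks past a prefix it does not go before
theorem pv_insertBy_append_left {α : Type} (before : α → α → Bool) (x : α)
    (l1 l2 : List α) (h : ∀ y ∈ l1, before x y = false) :
    PySem.List.insertBy before x (l1 ++ l2) = l1 ++ PySem.List.insertBy before x l2 := by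
  induction l1 with
  | nil => simp
  | cons y t ih =>
    have hy : before x y = false := h y (by simp)
    simp [PySem.List.insertBy, hy]
    exact ih (fun z hz => h z (by simp [hz]))

-- insertBy goes before everything it is before
theorem pv_insertBy_of_forall_before {α : Type} (before : α → α → Bool) (x : α)
    (l : List α) (h : ∀ y ∈ l, before x y = true) :
    PySem.List.insertBy before x l = x :: l := by
  cases l with
  | nil => simp [PySem.List.insertBy]
  | cons y t => simp [PySem.List.insertBy, h y (by simp)]

-- inserting one element into a key-grouped list appends it to its own bucket
theorem pv_insertBy_grouped {α : Type} (x : Int × α) (vs : List Int)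
    (f : Int → List (Int × α)) (hsd : vs.Pairwise (· > ·)) (hx : x.1 ∈ vs)
    (hf : ∀ v ∈ vs, ∀ q ∈ f v, q.1 = v) :
    PySem.List.insertBy (fun a b => decide (b.1 < a.1)) x (vs.flatMap f)
      = vs.flatMap (fun v => f v ++ if x.1 = v then [x] else []) := by
  induction vs with
  | nil => simp at hx
  | cons v vs' ih =>
    have hgt : ∀ w ∈ vs', v > w := (List.pairwise_cons.mp hsd).1
    have hsd' : vs'.Pairwise (· > ·) := (List.pairwise_cons.mp hsd).2
    by_cases hxv : x.1 = v
    · -- x belongs to the first bucket: skip it, then go before all later buckets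
      rw [List.flatMap_cons,
        pv_insertBy_append_left _ x (f v) (vs'.flatMap f)
          (fun y hy => by
            have := hf v (by simp) y hy
            simp [this, hxv]),
        pv_insertBy_of_forall_before _ x (vs'.flatMap f)
          (fun y hy => by
            obtain ⟨w, hw, hyw⟩ := List.mem_flatMap.mp hy
            have := hf w (by simp [hw]) y hyw
            have : y.1 < x.1 := by rw [this, hxv]; exact hgt w hw
            simpa using this)]
      rw [List.flatMap_cons]
      have hrest : List.flatMap f vs'
          = List.flatMap (fun w => f w ++ if x.1 = w then [x] else []) vs' :=
        List.flatMap_congr (fun w hw => by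
          have := hgt w hw
          rw [if_neg (by omega : ¬ x.1 = w)]; simp)
      rw [← hrest]
      simp [hxv]
    · -- x belongs to a later bucket
      have hx' : x.1 ∈ vs' := by
        cases List.mem_cons.mp hx with
        | inl h => exact absurd h hxv
        | inr h => exact h
      rw [List.flatMap_cons,
        pv_insertBy_append_left _ x (f v) (vs'.flatMap f)
          (fun y hy => by
            have hk := hf v (by simp) y hy
            have : x.1 < v := hgt _ hx'
            simp [hk]; omega),
        ih hsd' hx' (fun w hw q hq => hf w (by simp [hw]) q hq)]
      rw [List.flatMap_cons]
      simp [hxv]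

-- B's bucket fold keeps the length K+1 of the initial empty-bucket list
theorem pv_buckets_len {R : Type} (f : R → Int) (K : Nat) (rs : List R) :
    (rs.foldl (fun bk r => PySem.List.pySetD bk (f r) (PySem.List.pyGetD bk (f r) [] ++ [r]))
        ((PySem.List.pyRange 0 ((K : Int) + 1) 1).map (fun _ => ([] : List R)))).length = K + 1 := by
  have hgen : ∀ (l : List R) (bk : List (List R)),
      (l.foldl (fun bk r => PySem.List.pySetD bk (f r) (PySem.List.pyGetD bk (f r) [] ++ [r])) bk).length = bk.length := by
    intro l
    induction l with
    | nil => intro bk; rfl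
    | cons x t ih =>
      intro bk
      simp only [List.foldl_cons]
      rw [ih, PySem.List.length_pySetD]
  rw [hgen]
  have : ((K : Int) + 1) = ((K + 1 : Nat) : Int) := by push_cast; ring
  rw [this, PySem.List.pyRange_zero_natCast]
  simp

-- after the bucket fold, bucket h holds exactly the key-h elements, in input order
theorem pv_buckets_getD {R : Type} (f : R → Int) (K : Nat) (hf : ∀ r, 0 ≤ f r ∧ f r ≤ (K : Int))
    (rs : List R) :
    ∀ (h : Int), 0 ≤ h → h ≤ (K : Int) →
    PySem.List.pyGetD
      (rs.foldl (fun bk r => PySem.List.pySetD bk (f r) (PySem.List.pyGetD bk (f r) [] ++ [r]))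
        ((PySem.List.pyRange 0 ((K : Int) + 1) 1).map (fun _ => ([] : List R)))) h []
      = ((rs.map (fun r => (f r, r))).filter (fun q => decide (q.1 = h))).map (fun q => q.2) := by
  induction rs using List.reverseRecOn with
  | nil =>
    intro h h0 hK
    simp only [List.foldl_nil, List.map_nil, List.filter_nil]
    have hcast : h = ((h.toNat : Nat) : Int) := by omega
    rw [hcast, PySem.List.pyGetD_natCast]
    simp [List.getD_eq_getElem?_getD]
  | append_singleton rs x ih =>
    intro h h0 hK
    obtain ⟨hx0, hxK⟩ := hf x
    rw [List.foldl_append]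
    simp only [List.foldl_cons, List.foldl_nil]
    have hlen := pv_buckets_len f K rs
    set bk := rs.foldl (fun bk r => PySem.List.pySetD bk (f r) (PySem.List.pyGetD bk (f r) [] ++ [r]))
        ((PySem.List.pyRange 0 ((K : Int) + 1) 1).map (fun _ => ([] : List R))) with hbk
    have hfx : f x = (((f x).toNat : Nat) : Int) := by omega
    have hh : h = ((h.toNat : Nat) : Int) := by omega
    rw [hfx, hh, PySem.List.pyGetD_pySetD_natCast bk (f x).toNat h.toNat _ _ (by omega)]
    rw [List.map_append, List.filter_append, List.map_append]
    simp only [List.map_cons, List.map_nil, List.filter_cons, List.filter_nil]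
    by_cases heq : h.toNat = (f x).toNat
    · have hfe : f x = h := by omega
      rw [if_pos heq]
      rw [← hfx, ih (f x) hx0 hxK]
      simp [hfe, h0]
    · have hne : ¬ (f x = h) := by omega
      rw [if_neg heq, ← hh, ih h h0 hK]
      simp [hne]

-- Python's stable reverse sort by an Int key is the concatenation of the key's
-- buckets (input order kept) listed along any strictly decreasing cover of the keys
theorem pv_sorted_rev_grouped {α : Type} (p : List (Int × α)) (vs : List Int)
    (hsd : vs.Pairwise (· > ·)) (hall : ∀ q ∈ p, q.1 ∈ vs) :
    PySem.List.sorted p (fun x => x.1) true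
      = vs.flatMap (fun v => p.filter (fun q => q.1 = v)) := by
  rw [PySem.List.sorted_rev_eq_foldl_insertBy]
  induction p using List.reverseRecOn with
  | nil => simp
  | append_singleton p x ih =>
    rw [List.foldl_append]
    simp only [List.foldl_cons, List.foldl_nil]
    rw [ih (fun q hq => hall q (by simp [hq]))]
    rw [pv_insertBy_grouped x vs _ hsd (hall x (by simp))
      (fun v hv q hq => by simpa using (List.mem_filter.mp hq).2)]
    exact List.flatMap_congr (fun v hv => by
      rw [List.filter_append, List.filter_singleton]
      cases h : decide (x.1 = v) <;> simp_all)

-- ===== VERDICT (by name: the statement is the Claim_ definition above) =====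
theorem filter_results_by_keywords_py_spec : Claim_equal_filter_results_by_keywords_py := by
  intro results keywords _
  unfold Spec_filter_results_by_keywords_py filter_results_by_keywords_py filter_results_by_keywords_py_alt
  by_cases hr : results = []
  · simp [hr]
  by_cases hk : keywords = []
  · simp [hr, hk]
  simp only [if_neg hr, if_neg hk]
  set K := keywords.length with hKdef
  have hK1 : 1 ≤ K := List.length_pos_iff.mpr hk
  set scored := results.map (fun r => (pvHits keywords (pvText r), r)) with hsdef
  have hbound : ∀ q ∈ scored, 0 ≤ q.1 ∧ q.1 ≤ (K : Int) := by
    intro q hq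
    obtain ⟨r, _, hqr⟩ := List.mem_map.mp hq
    have hpv : pvHits keywords (pvText r) = ((keywords.countP (fun k => PySem.Str.isIn k (pvText r)) : Nat) : Int) := by
      rw [pvHits, PySem.List.foldl_if_add_one]; ring
    have hc := List.countP_le_length (l := keywords) (p := fun k => PySem.Str.isIn k (pvText r))
    have hq1 : q.1 = ((keywords.countP (fun k => PySem.Str.isIn k (pvText r)) : Nat) : Int) := by
      rw [← hqr]; exact hpv
    constructor <;> omega
  -- the strictly decreasing key covers [K, …, 1] and [K, …, 0]
  set vsB := (List.range K).map (fun k : Nat => ((K : Int) - (k : Int))) with hvB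
  set vs0 := (List.range (K + 1)).map (fun k : Nat => ((K : Int) - (k : Int))) with hv0
  have hsd0 : vs0.Pairwise (· > ·) := by
    rw [hv0, List.pairwise_map]
    exact List.pairwise_lt_range.imp (fun h => by omega)
  have hall : ∀ q ∈ scored, q.1 ∈ vs0 := by
    intro q hq
    obtain ⟨h0, h1⟩ := hbound q hq
    exact List.mem_map.mpr ⟨((K : Int) - q.1).toNat, List.mem_range.mpr (by omega), by omega⟩
  have hsplit : vs0 = vsB ++ [0] := by
    rw [hv0, hvB, List.range_succ, List.map_append]; simp
  -- A's filtered list, bucketed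
  rw [pv_sorted_rev_grouped scored vs0 hsd0 hall, hsplit, List.flatMap_append,
    List.filter_append, List.filter_flatMap]
  have hbpos : ∀ v ∈ vsB, (scored.filter (fun q => q.1 = v)).filter (fun x => 0 < x.1)
      = scored.filter (fun q => q.1 = v) := by
    intro v hv
    obtain ⟨k, hk', hkv⟩ := List.mem_map.mp hv
    have hkK : k < K := List.mem_range.mp hk'
    apply List.filter_eq_self.mpr
    intro q hq
    have := (List.mem_filter.mp hq).2
    simp only [decide_eq_true_eq] at this ⊢
    omega
  rw [List.flatMap_congr hbpos]
  have hzero : (List.flatMap (fun v => scored.filter (fun q => q.1 = v)) [0]).filter (fun x => 0 < x.1) = [] := by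
    simp only [List.flatMap_cons, List.flatMap_nil, List.append_nil]
    apply List.filter_eq_nil_iff.mpr
    intro q hq
    have := (List.mem_filter.mp hq).2
    simp only [decide_eq_true_eq] at this ⊢
    omega
  rw [hzero, List.append_nil]
  -- B's filtered list is the same bucketed list
  rw [PySem.List.foldl_append_eq_flatMap, List.nil_append, PySem.List.pyRange_neg_one]
  have hrng : ((K : Int) - 0).toNat = K := by omega
  rw [hrng]
  have hfb : ∀ r, 0 ≤ pvHits keywords (pvText r) ∧ pvHits keywords (pvText r) ≤ (K : Int) := by
    intro r
    have hpv : pvHits keywords (pvText r) = ((keywords.countP (fun k => PySem.Str.isIn k (pvText r)) : Nat) : Int) := by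
      rw [pvHits, PySem.List.foldl_if_add_one]; ring
    have hc := List.countP_le_length (l := keywords) (p := fun k => PySem.Str.isIn k (pvText r))
    constructor <;> omega
  rw [List.flatMap_congr (g := fun h => (scored.filter (fun q => decide (q.1 = h))).map (fun q => q.2))
    (fun v hv => by
      obtain ⟨k, hk', hkv⟩ := List.mem_map.mp hv
      have hkK : k < K := List.mem_range.mp hk'
      exact pv_buckets_getD (fun r => pvHits keywords (pvText r)) K hfb results v (by omega) (by omega))]
  rw [List.map_flatMap]
  -- the fallback lists agree as well
  have hfall : scored.map (fun x => x.2) = results := by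
    rw [hsdef, List.map_map]; simp [Function.comp_def]
  rw [hfall]
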